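-- pv_equiv track=rewrite | github.com/ttzytt/PyAutoGrade | tests/ex2/tested_code/23/Unit 1/Cards/card_functions.py | uno_who_played_what
-- ===== SOURCE A (Python) =====
-- def uno_who_played_what(cards_played):
--     players = [[], [], [], []]
--     current_player = 0
--     reverse_direction = 1
--
--     for i in range(len(cards_played)):
--         players[current_player].append(cards_played[i])
--
--         if cards_played[i] == 'skip':
--             current_player = (current_player + 2 * reverse_direction) % 4
--
--         elif cards_played[i] == 'reverse':
--             reverse_direction *= -1
--             current_player = (current_player + reverse_direction) % 4
--
--         else:
--             current_player = (current_player + reverse_direction) % 4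
--
--     return players
-- ===== SOURCE B (Python) =====
-- def uno_who_played_what(cards_played):
--     # Closed form instead of a state machine: the direction before card i is
--     # (-1)**(number of 'reverse' cards before i), the pointer advance caused by
--     # card i is 2*dir for 'skip', -dir for 'reverse' (flip happens before the
--     # move), dir otherwise, and the owner of card i is the cumulative sum of
--     # the advances of cards 0..i-1, taken mod 4.  Finally group cards by owner.
--     parity = [0]
--     for c in cards_played:
--         parity.append(1 - parity[-1] if c == 'reverse' else parity[-1])
--     steps = [(2 if c == 'skip' else -1 if c == 'reverse' else 1) * (-1 if p else 1)
--              for c, p in zip(cards_played, parity)]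
--     owners = []
--     total = 0
--     for s in steps:
--         owners.append(total % 4)
--         total += s
--     return [[c for c, o in zip(cards_played, owners) if o == j] for j in range(4)]
-- ===== Notes on version B (the rewrite author's own statement) =====
-- stated objective: alternative
-- what changed: B replaces A's turn-pointer state machine by a closed form: the direction before each card is (-1)^(reverses so far), each card's advance is derived from that, the owner is a prefix sum of advances mod 4, and the hands are built by grouping cards by owner.
import Mathlib
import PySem

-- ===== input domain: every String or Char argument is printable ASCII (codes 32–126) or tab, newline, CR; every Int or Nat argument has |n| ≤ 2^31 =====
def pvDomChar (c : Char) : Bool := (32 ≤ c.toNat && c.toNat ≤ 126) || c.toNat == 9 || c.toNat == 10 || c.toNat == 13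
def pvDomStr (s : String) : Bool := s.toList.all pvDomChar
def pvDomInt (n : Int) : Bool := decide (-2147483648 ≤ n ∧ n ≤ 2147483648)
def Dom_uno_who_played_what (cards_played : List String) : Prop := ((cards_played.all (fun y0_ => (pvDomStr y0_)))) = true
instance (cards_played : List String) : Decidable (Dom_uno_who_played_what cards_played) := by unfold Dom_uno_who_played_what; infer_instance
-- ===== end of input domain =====

-- B replaces A's turn-pointer state machine by a closed form: direction = (-1)^(reverses so far),
-- owner = prefix sum of per-card advances mod 4, then group cards by owner (objective: alternative).

-- ===== PORT A =====
-- A's single fused loop: state (players, current_player, reverse_direction); players[cur].append(card), then move.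
def uno_who_played_what (cards_played : List String) : List (List String) :=
  (cards_played.foldl
    (fun (st : List (List String) × Int × Int) c =>
      let ps := st.1.modify st.2.1.toNat (fun pj => pj ++ [c])
      if c = "skip" then (ps, PySem.Int.mod (st.2.1 + 2 * st.2.2) 4, st.2.2)
      else if c = "reverse" then
        let d := -st.2.2
        (ps, PySem.Int.mod (st.2.1 + d) 4, d)
      else (ps, PySem.Int.mod (st.2.1 + st.2.2) 4, st.2.2))
    ([[], [], [], []], 0, 1)).1

-- ===== PORT B =====
-- B step 1: parity[i] = number of 'reverse' cards before card i, mod 2 (one extra trailing entry, as in Source B).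
def unoParity (cards_played : List String) : List Int :=
  cards_played.foldl
    (fun parity c =>
      -- parity[-1]; the list starts as [0] and only grows, so the index is always valid
      let p := (PySem.List.pyGet? parity (-1)).getD 0
      parity ++ [if c = "reverse" then 1 - p else p])
    [0]

-- B step 2: the pointer advance caused by each card (zip truncates the extra parity entry).
def unoSteps (cards_played : List String) : List Int :=
  (cards_played.zip (unoParity cards_played)).map
    (fun cp =>
      (if cp.1 = "skip" then 2 else if cp.1 = "reverse" then -1 else 1) *
      (if ¬ cp.2 = 0 then -1 else 1))

-- B step 3: owners = running total of advances, mod 4 at read-out.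
def unoOwners (cards_played : List String) : List Int :=
  ((unoSteps cards_played).foldl
    (fun (st : List Int × Int) s => (st.1 ++ [PySem.Int.mod st.2 4], st.2 + s))
    ([], 0)).1

-- B step 4: group the cards by owner index.
def uno_who_played_what_alt (cards_played : List String) : List (List String) :=
  let owners := unoOwners cards_played
  (List.range 4).map
    (fun j => ((cards_played.zip owners).filter (fun p => p.2 == (j : Int))).map Prod.fst)

-- ===== PRECONDITION & SPEC =====
def Spec_uno_who_played_what (cards_played : List String) (out : List (List String)) : Prop := out = uno_who_played_what_alt cards_played
instance (cards_played : List String) (out : List (List String)) : Decidable (Spec_uno_who_played_what cards_played out) := by unfold Spec_uno_who_played_what; infer_instance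

-- ===== CLAIM (what is proved, stated in full; the proofs are below) =====
def Claim_equal_uno_who_played_what : Prop := ∀ (cards_played : List String), Dom_uno_who_played_what cards_played → Spec_uno_who_played_what cards_played (uno_who_played_what cards_played)

-- ===== LEMMAS AND PROOFS =====

-- named copy of A's fold body (proof layer only)
def stepA (st : List (List String) × Int × Int) (c : String) : List (List String) × Int × Int :=
  let ps := st.1.modify st.2.1.toNat (fun pj => pj ++ [c])
  if c = "skip" then (ps, PySem.Int.mod (st.2.1 + 2 * st.2.2) 4, st.2.2)
  else if c = "reverse" then
    let d := -st.2.2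
    (ps, PySem.Int.mod (st.2.1 + d) 4, d)
  else (ps, PySem.Int.mod (st.2.1 + st.2.2) 4, st.2.2)

-- one pointer step of A's state machine, shared by the proofs
def unoStep (cur dir : Int) (c : String) : Int × Int :=
  if c = "skip" then (PySem.Int.mod (cur + 2 * dir) 4, dir)
  else if c = "reverse" then (PySem.Int.mod (cur + -dir) 4, -dir)
  else (PySem.Int.mod (cur + dir) 4, dir)

-- the owner sequence of A's state machine starting from state (cur, dir)
def ownersFrom : List String → Int → Int → List Int
  | [], _, _ => []
  | c :: cs, cur, dir => cur :: ownersFrom cs (unoStep cur dir c).1 (unoStep cur dir c).2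

-- recursive view of B's parity entries used by the zip (values in {0,1})
def parityFrom : List String → Int → List Int
  | [], _ => []
  | c :: cs, p => p :: parityFrom cs (if c = "reverse" then 1 - p else p)

-- recursive view of B's owner loop
def ownersOf : List Int → Int → List Int
  | [], _ => []
  | s :: ss, t => PySem.Int.mod t 4 :: ownersOf ss (t + s)

def grp (cards : List String) (cur dir : Int) (j : Nat) : List String :=
  ((cards.zip (ownersFrom cards cur dir)).filter (fun p => p.2 == (j : Int))).map Prod.fst

theorem portA_foldl (cards : List String) :
    uno_who_played_what cards = (cards.foldl stepA ([[], [], [], []], 0, 1)).1 := rfl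

theorem stepA_eq (ps : List (List String)) (cur dir : Int) (c : String) :
    stepA (ps, cur, dir) c =
      (ps.modify cur.toNat (fun pj => pj ++ [c]), (unoStep cur dir c).1, (unoStep cur dir c).2) := by
  simp only [stepA, unoStep]; split_ifs <;> rfl

theorem unoStep_mem (cur dir : Int) (c : String) :
    0 ≤ (unoStep cur dir c).1 ∧ (unoStep cur dir c).1 < 4 := by
  unfold unoStep; split_ifs <;>
    exact ⟨PySem.Int.mod_nonneg _ (by norm_num), PySem.Int.mod_lt _ (by norm_num)⟩

-- B's parity fold produces its accumulator followed by parityFrom of the rest (plus one final entry)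
theorem unoParity_eq : ∀ (cards : List String) (acc : List Int) (p : Int),
    cards.foldl
      (fun parity c =>
        let q := (PySem.List.pyGet? parity (-1)).getD 0
        parity ++ [if c = "reverse" then 1 - q else q])
      (acc ++ [p])
    = acc ++ parityFrom cards p ++ [(cards.foldl (fun q c => if c = "reverse" then 1 - q else q) p)]
  | [], acc, p => by simp [parityFrom]
  | c :: cs, acc, p => by
    rw [List.foldl_cons]
    have hlast : (PySem.List.pyGet? (acc ++ [p]) (-1)).getD 0 = p := by
      simp [PySem.List.pyGet?, PySem.List.pyIdx?]
    simp only [hlast]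
    rw [show acc ++ [p] ++ [if c = "reverse" then 1 - p else p]
          = (acc ++ [p]) ++ [if c = "reverse" then 1 - p else p] from by simp,
        unoParity_eq cs (acc ++ [p]) _]
    simp [parityFrom]

theorem zip_trunc {α β : Type} : ∀ (xs : List α) (ys zs : List β), xs.length ≤ ys.length →
    xs.zip (ys ++ zs) = xs.zip ys
  | [], _, _, _ => by simp
  | x :: xs, y :: ys, zs, h => by
    simp only [List.cons_append, List.zip_cons_cons, zip_trunc xs ys zs (by simpa using h)]
  | _ :: _, [], _, h => by simp at h

-- zipping cards with the full parity list drops the trailing entry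
theorem zip_parity (cards : List String) :
    cards.zip (unoParity cards) = cards.zip (parityFrom cards 0) := by
  have h := unoParity_eq cards [] 0
  unfold unoParity
  rw [show ([0] : List Int) = [] ++ [0] from rfl]
  have hlen : ∀ (cs : List String) (p : Int), (parityFrom cs p).length = cs.length := by
    intro cs; induction cs with
    | nil => intro p; rfl
    | cons c cs ih => intro p; simp [parityFrom, ih]
  simp only [List.nil_append] at h ⊢
  rw [h]
  exact zip_trunc cards _ _ (by rw [hlen])

-- B's owner fold equals ownersOf
theorem unoOwnersFold_eq : ∀ (ss : List Int) (acc : List Int) (t : Int),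
    (ss.foldl (fun (st : List Int × Int) s => (st.1 ++ [PySem.Int.mod st.2 4], st.2 + s)) (acc, t)).1
    = acc ++ ownersOf ss t
  | [], acc, t => by simp [ownersOf]
  | s :: ss, acc, t => by
    rw [List.foldl_cons, unoOwnersFold_eq ss]
    simp [ownersOf]

theorem mod_add_mod (t s : Int) : PySem.Int.mod (PySem.Int.mod t 4 + s) 4 = PySem.Int.mod (t + s) 4 := by
  rw [PySem.Int.mod_eq_emod_of_pos (by norm_num : (0:Int) < 4),
      PySem.Int.mod_eq_emod_of_pos (by norm_num : (0:Int) < 4),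
      PySem.Int.mod_eq_emod_of_pos (by norm_num : (0:Int) < 4)]
  omega

-- the bridge: B's prefix-sum owners are A's state-machine owners
theorem ownersOf_eq : ∀ (cards : List String) (t p : Int), (p = 0 ∨ p = 1) →
    ownersOf ((cards.zip (parityFrom cards p)).map
      (fun cp => (if cp.1 = "skip" then 2 else if cp.1 = "reverse" then -1 else 1) *
                 (if ¬ cp.2 = 0 then -1 else 1))) t
    = ownersFrom cards (PySem.Int.mod t 4) (if p = 0 then 1 else -1)
  | [], t, p, _ => by simp [parityFrom, ownersOf, ownersFrom]
  | c :: cs, t, p, hp => by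
    simp only [parityFrom, List.zip_cons_cons, List.map_cons, ownersOf, ownersFrom]
    congr 1
    set d : Int := if p = 0 then 1 else -1 with hd
    set p' : Int := if c = "reverse" then 1 - p else p with hp'
    have hp'01 : p' = 0 ∨ p' = 1 := by rw [hp']; split_ifs <;> omega
    rw [ownersOf_eq cs _ p' hp'01]
    have hstep : (if c = "skip" then (2:Int) else if c = "reverse" then -1 else 1) *
          (if ¬ p = 0 then -1 else 1)
        = (if c = "skip" then 2 * d else if c = "reverse" then -d else d) := by
      rw [hd]; rcases hp with h | h <;> subst h <;> split_ifs <;> norm_num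
    have hdir : (if p' = 0 then (1:Int) else -1) = (if c = "reverse" then -d else d) := by
      rw [hp', hd]; rcases hp with h | h <;> subst h <;> split_ifs <;> simp_all
    rw [hstep, hdir]
    unfold unoStep
    split_ifs with h1 h2 <;> simp only [mod_add_mod] <;> simp_all

theorem grp_cons (c : String) (cs : List String) (cur dir : Int) (j : Nat) :
    grp (c :: cs) cur dir j =
      (if cur = (j : Int) then [c] else []) ++ grp cs (unoStep cur dir c).1 (unoStep cur dir c).2 j := by
  simp only [grp, ownersFrom, List.zip, List.zipWith]
  by_cases h : cur = (j : Int)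
  · simp [List.filter, h]
  · have hb : (cur == (j : Int)) = false := by simp [h]
    simp [List.filter, hb, h]

theorem unoA_loop_eq : ∀ (cards : List String) (p0 p1 p2 p3 : List String) (cur dir : Int),
    0 ≤ cur → cur < 4 →
    (cards.foldl stepA ([p0, p1, p2, p3], cur, dir)).1
    = [p0 ++ grp cards cur dir 0, p1 ++ grp cards cur dir 1,
       p2 ++ grp cards cur dir 2, p3 ++ grp cards cur dir 3]
  | [], p0, p1, p2, p3, cur, dir, _, _ => by simp [grp, ownersFrom]
  | c :: cs, p0, p1, p2, p3, cur, dir, h0, h4 => by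
    rw [List.foldl_cons, stepA_eq]
    have hm := unoStep_mem cur dir c
    interval_cases cur
    · rw [show ([p0, p1, p2, p3].modify (Int.toNat 0) fun pj => pj ++ [c]) = [p0 ++ [c], p1, p2, p3] from rfl,
        unoA_loop_eq cs _ _ _ _ _ _ hm.1 hm.2]
      simp [grp_cons]
    · rw [show ([p0, p1, p2, p3].modify (Int.toNat 1) fun pj => pj ++ [c]) = [p0, p1 ++ [c], p2, p3] from rfl,
        unoA_loop_eq cs _ _ _ _ _ _ hm.1 hm.2]
      simp [grp_cons]
    · rw [show ([p0, p1, p2, p3].modify (Int.toNat 2) fun pj => pj ++ [c]) = [p0, p1, p2 ++ [c], p3] from rfl,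
        unoA_loop_eq cs _ _ _ _ _ _ hm.1 hm.2]
      simp [grp_cons]
    · rw [show ([p0, p1, p2, p3].modify (Int.toNat 3) fun pj => pj ++ [c]) = [p0, p1, p2, p3 ++ [c]] from rfl,
        unoA_loop_eq cs _ _ _ _ _ _ hm.1 hm.2]
      simp [grp_cons]

theorem unoOwners_eq (cards : List String) : unoOwners cards = ownersFrom cards 0 1 := by
  unfold unoOwners unoSteps
  rw [unoOwnersFold_eq, zip_parity, ownersOf_eq cards 0 0 (Or.inl rfl)]
  simp

-- ===== VERDICT (by name: the statement is the Claim_ definition above) =====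
theorem uno_who_played_what_spec : Claim_equal_uno_who_played_what := by
  intro cards _
  unfold Spec_uno_who_played_what
  rw [portA_foldl, unoA_loop_eq cards [] [] [] [] 0 1 (by norm_num) (by norm_num)]
  simp [uno_who_played_what_alt, unoOwners_eq, List.range_succ, grp]
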